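-- pv_equiv track=rewrite | github.com/AHMASww/LeetCode | leetcode165.py | trueLength
-- ===== SOURCE A (Python) =====
-- def trueLength(version):
--     length = len(version)
--     for i in range(len(version)-1, -1, -1):
--         if version[i] == 0:
--             length -= 1
--         else:
--             return length
--
--     return length
-- ===== SOURCE B (Python) =====
-- def trueLength(version):
--     length = 0
--     for i, v in enumerate(version):
--         if v != 0:
--             length = i + 1
--     return length
-- ===== Notes on version B (the rewrite author's own statement) =====
-- stated objective: idiomatic
-- what changed: Replaces the backward early-exit scan that decrements len(version) with a single forward enumerate pass that records the position just past the last nonzero element.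
import Mathlib
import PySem

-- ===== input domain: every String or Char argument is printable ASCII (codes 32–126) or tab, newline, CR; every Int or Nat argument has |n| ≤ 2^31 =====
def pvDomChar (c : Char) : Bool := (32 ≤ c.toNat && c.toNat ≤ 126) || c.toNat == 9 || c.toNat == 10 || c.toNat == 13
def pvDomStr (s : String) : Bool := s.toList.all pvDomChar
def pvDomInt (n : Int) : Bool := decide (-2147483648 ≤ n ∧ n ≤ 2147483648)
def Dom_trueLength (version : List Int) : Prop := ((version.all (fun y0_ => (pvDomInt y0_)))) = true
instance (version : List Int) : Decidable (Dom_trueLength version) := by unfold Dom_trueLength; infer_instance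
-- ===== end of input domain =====

-- B replaces A's backward early-exit scan with a single forward enumerate pass (idiomatic).

-- ===== PORT A =====
-- the for-loop over range(len(version)-1, -1, -1), with its early return
def trueLengthGo (version : List Int) : List Int → Int → Int
  | [], length => length
  | i :: rest, length =>
    if PySem.List.pyGetD version i 0 = 0 then trueLengthGo version rest (length - 1)
    else length

def trueLength (version : List Int) : Int :=
  trueLengthGo version (PySem.List.pyRange ((version.length : Int) - 1) (-1) (-1)) (version.length : Int)

-- ===== PORT B =====
def trueLength_alt (version : List Int) : Int :=
  (PySem.List.enumerate version 0).foldl (fun length iv => if iv.2 ≠ 0 then iv.1 + 1 else length) 0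

-- ===== PRECONDITION & SPEC =====
def Spec_trueLength (version : List Int) (out : Int) : Prop := out = trueLength_alt version
instance (version : List Int) (out : Int) : Decidable (Spec_trueLength version out) := by unfold Spec_trueLength; infer_instance

-- ===== CLAIM (what is proved, stated in full; the proofs are below) =====
def Claim_equal_trueLength : Prop := ∀ (version : List Int), Dom_trueLength version → Spec_trueLength version (trueLength version)

-- ===== LEMMAS AND PROOFS =====

-- A's loop body only reads indices in [0, xs.length), so appending an element is invisible to it
theorem trueLengthGo_append (xs : List Int) (v : Int) (l : List Int) (acc : Int)
    (h : ∀ i ∈ l, 0 ≤ i ∧ i < (xs.length : Int)) :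
    trueLengthGo (xs ++ [v]) l acc = trueLengthGo xs l acc := by
  induction l generalizing acc with
  | nil => rfl
  | cons i rest ih =>
    obtain ⟨h0, hlt⟩ := h i (List.mem_cons_self)
    have hget : PySem.List.pyGetD (xs ++ [v]) i 0 = PySem.List.pyGetD xs i 0 := by
      rw [PySem.List.pyGetD_eq_getElem (xs ++ [v]) 0 h0 (by simp; omega),
          PySem.List.pyGetD_eq_getElem xs 0 h0 (by omega)]
      exact List.getElem_append_left (by omega)
    simp only [trueLengthGo, hget]
    split
    · exact ih _ (fun j hj => h j (List.mem_cons_of_mem _ hj))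
    · rfl

theorem trueLength_append (xs : List Int) (v : Int) :
    trueLength (xs ++ [v]) = if v = 0 then trueLength xs else (xs.length : Int) + 1 := by
  have hn : ((xs ++ [v]).length : Int) - 1 = (xs.length : Int) := by simp
  have hcons : PySem.List.pyRange (xs.length : Int) (-1) (-1)
      = (xs.length : Int) :: PySem.List.pyRange ((xs.length : Int) - 1) (-1) (-1) :=
    PySem.List.pyRange_neg_one_cons (by omega)
  have hget : PySem.List.pyGetD (xs ++ [v]) (xs.length : Int) 0 = v := by
    simp [PySem.List.pyGetD_natCast, List.getD_eq_getElem?_getD]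
  unfold trueLength
  rw [hn, hcons]
  simp only [trueLengthGo, hget]
  by_cases hv : v = 0
  · rw [if_pos hv, if_pos hv,
      trueLengthGo_append xs v _ _ (fun i hi => by
        have := (PySem.List.mem_pyRange_neg_one).1 hi
        omega)]
    have hacc : ((xs ++ [v]).length : Int) - 1 = (xs.length : Int) := by simp
    rw [hacc]
  · rw [if_neg hv, if_neg hv]
    simp

theorem enumerate_append_singleton (xs : List Int) (v : Int) (s : Int) :
    PySem.List.enumerate (xs ++ [v]) s
      = PySem.List.enumerate xs s ++ [(s + (xs.length : Int), v)] := by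
  induction xs generalizing s with
  | nil => simp [PySem.List.enumerate_cons, PySem.List.enumerate_nil]
  | cons x xs ih =>
    simp only [List.cons_append, PySem.List.enumerate_cons, ih]
    simp
    ring_nf

theorem trueLength_alt_append (xs : List Int) (v : Int) :
    trueLength_alt (xs ++ [v]) = if v = 0 then trueLength_alt xs else (xs.length : Int) + 1 := by
  unfold trueLength_alt
  rw [enumerate_append_singleton, List.foldl_append]
  simp only [List.foldl_cons, List.foldl_nil]
  split_ifs with h₁ h₂ <;> simp_all

-- ===== VERDICT (by name: the statement is the Claim_ definition above) =====
theorem trueLength_spec : Claim_equal_trueLength := by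
  intro version hd
  unfold Spec_trueLength
  induction version using List.reverseRecOn with
  | nil => decide
  | append_singleton xs v ih =>
    have hdx : Dom_trueLength xs := by
      unfold Dom_trueLength at hd ⊢
      simp only [List.all_append, Bool.and_eq_true] at hd
      exact hd.1
    rw [trueLength_append, trueLength_alt_append]
    split <;> [exact ih hdx; rfl]
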